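-- pv_equiv track=rewrite | github.com/Arritmic/oulu-wildfire-drones | src/webviz/server.py | _parse_agent_status
-- ===== SOURCE A (Python) =====
-- from typing import List, Optional
--
-- def _parse_agent_status(txt: str) -> List[List[str]]:
--     steps: List[List[str]] = []
--     acc: List[str] = []
--     for line in txt.splitlines():
--         t = line.strip()
--         if t.lower().startswith("step "):
--             if acc:
--                 steps.append(acc);
--                 acc = []
--         elif t:
--             acc.append(t)
--     if acc:
--         steps.append(acc)
--     return steps
-- ===== SOURCE B (Python) =====
-- from typing import List
-- from itertools import groupby
--
-- def _parse_agent_status(txt: str) -> List[List[str]]: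
--     stripped = [line.strip() for line in txt.splitlines()]
--     tokens = [None if t.lower().startswith("step ") else t for t in stripped if t]
--     return [list(g) for is_sep, g in groupby(tokens, key=lambda x: x is None) if not is_sep]
-- ===== Notes on version B (the rewrite author's own statement) =====
-- stated objective: idiomatic
-- what changed: Replaces the stateful accumulator/flush loop by a tokenize-then-group pipeline: strip and drop blank lines, map step markers to a None sentinel, then itertools.groupby collects the runs of content lines.
import Mathlib
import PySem

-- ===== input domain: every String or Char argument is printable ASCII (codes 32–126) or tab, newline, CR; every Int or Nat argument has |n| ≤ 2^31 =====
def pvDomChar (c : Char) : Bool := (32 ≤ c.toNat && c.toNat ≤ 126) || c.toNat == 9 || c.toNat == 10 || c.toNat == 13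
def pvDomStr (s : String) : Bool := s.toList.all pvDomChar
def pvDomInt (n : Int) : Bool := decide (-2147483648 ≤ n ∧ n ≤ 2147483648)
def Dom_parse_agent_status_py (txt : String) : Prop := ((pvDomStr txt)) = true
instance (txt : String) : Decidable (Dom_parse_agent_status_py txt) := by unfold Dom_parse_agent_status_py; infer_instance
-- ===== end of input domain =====

-- B replaces A's stateful accumulator/flush loop by a tokenize-then-group pipeline (idiomatic; same cost).

-- ===== PORT A =====
-- literal transliteration of A's accumulator loop
-- the loop body (one line of A's for-loop) and the final flush, as named helpers
def pvStepA (st : List (List String) × List String) (line : String) : List (List String) × List String :=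
  let t := PySem.Str.strip line
  if PySem.Str.startswith (PySem.Str.lower t) "step " then
    if st.2 ≠ [] then (st.1 ++ [st.2], []) else st
  else if t ≠ "" then (st.1, st.2 ++ [t])
  else st

def pvFinish (p : List (List String) × List String) : List (List String) :=
  if p.2 ≠ [] then p.1 ++ [p.2] else p.1

def parse_agent_status_py (txt : String) : List (List String) :=
  pvFinish ((PySem.Str.splitlines txt).foldl pvStepA ([], []))

-- ===== PORT B =====
-- port of itertools.groupby + "if not is_sep": collect maximal runs of `some` tokens
def pvGroups : List (Option String) → List (List String)
  | [] => []
  | none :: r => pvGroups r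
  | some t :: r =>
      (t :: (r.takeWhile Option.isSome).filterMap id) :: pvGroups (r.dropWhile Option.isSome)
termination_by l => l.length
decreasing_by
  all_goals
    (simp
     try (have := List.length_dropWhile_le (p := Option.isSome) (l := r); omega))

-- the two comprehensions of Source B: strip every line, drop blanks, turn step markers into `none`
def pvToks (lines : List String) : List (Option String) :=
  ((lines.map PySem.Str.strip).filter (fun t => t ≠ "")).map
    (fun t => if PySem.Str.startswith (PySem.Str.lower t) "step " then (none : Option String) else some t)

def parse_agent_status_py_alt (txt : String) : List (List String) :=
  pvGroups (pvToks (PySem.Str.splitlines txt))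

-- ===== PRECONDITION & SPEC =====
def Spec_parse_agent_status_py (txt : String) (out : List (List String)) : Prop := out = parse_agent_status_py_alt txt
instance (txt : String) (out : List (List String)) : Decidable (Spec_parse_agent_status_py txt out) := by unfold Spec_parse_agent_status_py; infer_instance

-- ===== CLAIM (what is proved, stated in full; the proofs are below) =====
def Claim_equal_parse_agent_status_py : Prop := ∀ (txt : String), Dom_parse_agent_status_py txt → Spec_parse_agent_status_py txt (parse_agent_status_py txt)

-- ===== LEMMAS AND PROOFS =====

-- grouping with a pending accumulator: the bridge between A's state and B's runs
def pvGrp (acc : List String) : List (Option String) → List (List String)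
  | [] => if acc ≠ [] then [acc] else []
  | none :: r => (if acc ≠ [] then [acc] else []) ++ pvGrp [] r
  | some t :: r => pvGrp (acc ++ [t]) r

lemma pvGrp_eq (toks : List (Option String)) : ∀ (acc : List String),
    pvGrp acc toks = if acc = [] then pvGroups toks
      else (acc ++ (toks.takeWhile Option.isSome).filterMap id) :: pvGroups (toks.dropWhile Option.isSome) := by
  induction toks with
  | nil =>
      intro acc
      by_cases h : acc = [] <;> simp [pvGrp, pvGroups, h]
  | cons x r ih =>
      intro acc
      cases x with
      | none =>
          have h0 := ih []
          by_cases h : acc = [] <;>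
            simp [pvGrp, pvGroups, h, h0, List.takeWhile, List.dropWhile]
      | some t =>
          have h1 := ih (acc ++ [t])
          rw [if_neg (by simp)] at h1
          by_cases h : acc = []
          · subst h
            simp only [List.nil_append] at h1
            simp [pvGrp, pvGroups, List.takeWhile, List.dropWhile, h1]
          · simp [pvGrp, pvGroups, h, h1, List.takeWhile, List.dropWhile]

lemma pvFold_eq (lines : List String) : ∀ (steps : List (List String)) (acc : List String),
    pvFinish (lines.foldl pvStepA (steps, acc)) = steps ++ pvGrp acc (pvToks lines) := by
  induction lines with
  | nil =>
      intro steps acc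
      by_cases h : acc = [] <;> simp [pvFinish, pvGrp, pvToks, h]
  | cons line rest ih =>
      intro steps acc
      simp only [List.foldl_cons]
      by_cases ht : PySem.Str.strip line = ""
      · have h0 : PySem.Chars.strip line.toList = ([] : List Char) := by
          have := congrArg String.toList ht
          simpa using this
        have hsf : PySem.Chars.startswith (PySem.Chars.lower ([] : List Char)) ['s', 't', 'e', 'p', ' '] = false := rfl
        by_cases h : acc = [] <;>
          simp [pvStepA, pvToks, pvGrp, ht, h0, hsf, h, ih]
      · by_cases hs : PySem.Chars.startswith (PySem.Chars.lower (PySem.Chars.strip line.toList)) ['s', 't', 'e', 'p', ' '] = true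
        · by_cases h : acc = [] <;>
            simp [pvStepA, pvToks, pvGrp, hs, ht, h, ih]
        · simp [pvStepA, pvToks, pvGrp, hs, ht, ih]

-- ===== VERDICT (by name: the statement is the Claim_ definition above) =====
theorem parse_agent_status_py_spec : Claim_equal_parse_agent_status_py := by
  intro txt _
  unfold Spec_parse_agent_status_py parse_agent_status_py parse_agent_status_py_alt
  rw [pvFold_eq, pvGrp_eq, if_pos rfl, List.nil_append]
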